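-- pv_equiv track=rewrite | github.com/freddiemcnay/repeat-resolver-with-BLAT | repeat_resolver_with_BLAT.py | interpret_structure
-- ===== SOURCE A (Python) =====
-- def interpret_structure(structure_string, strand='+'):
--     """
--     Convert structure string like 'b-C-C-C-c-c-c-c-c-c-C-C-C-c-c-c-c-c'
--     into simplified format like 'B-C×2'
--
--     If strand is '-', the structure is reversed before interpretation to give
--     the true 5'->3' structure of the read.
--
--     Logic:
--     1. If reverse strand: reverse the structure string
--     2. Group consecutive windows of same unit
--     3. Count tandem copies by looking for lowercase→uppercase transitions
--     4. Simplify consecutive Us to single U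
--     5. Output format: Unit×count (if count > 1)
--     """
--     # If reverse strand, reverse the structure to get true 5'->3' orientation
--     if strand == '-':
--         elements = structure_string.split('-')
--         elements.reverse()
--         structure_string = '-'.join(elements)
--
--     elements = structure_string.split('-')
--
--     result = []
--     i = 0
--
--     while i < len(elements):
--         current_unit = elements[i].upper()
--
--         # Special handling for U (undetermined)
--         if current_unit == 'U':
--             # Skip all consecutive Us
--             j = i
--             while j < len(elements) and elements[j].upper() == 'U':
--                 j += 1
--             result.append('U')
--             i = j
--             continue
--
--         # Count tandem copies for this unit
--         tandem_count = 1  # Start with 1 (first occurrence)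
--         j = i
--         prev_was_lower = False
--
--         while j < len(elements) and elements[j].upper() == current_unit:
--             # Count transition from lowercase to uppercase as new tandem
--             if elements[j].isupper() and prev_was_lower:
--                 tandem_count += 1
--
--             prev_was_lower = elements[j].islower()
--             j += 1
--
--         # Format output
--         if tandem_count > 1:
--             result.append(f"{current_unit}×{tandem_count}")
--         else:
--             result.append(current_unit)
--
--         i = j
--
--     return '-'.join(result)
-- ===== SOURCE B (Python) =====
-- def interpret_structure(structure_string, strand='+'):
--     """Single flat pass with a counter stack: each element either opens a new
--     (unit, count) group on the stack or bumps the top counter on a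
--     lowercase->uppercase step; a final comprehension formats the groups.
--     No nested scanning loops and no index pointers."""
--     if strand == '-':
--         structure_string = '-'.join(reversed(structure_string.split('-')))
--
--     groups = []           # stack of [unit, tandem_count]
--     prev = None
--     for el in structure_string.split('-'):
--         u = el.upper()
--         if not groups or groups[-1][0] != u:
--             groups.append([u, 1])
--         elif el.isupper() and prev.islower():
--             groups[-1][1] += 1
--         prev = el
--
--     return '-'.join(u if u == 'U' or c == 1 else f'{u}\u00d7{c}' for u, c in groups)
-- ===== Notes on version B (the rewrite author's own statement) =====
-- stated objective: simpler
-- what changed: Replaced A's nested dual-pointer scanning (outer cursor plus an inner while loop re-scanning each run, formatting as it goes) by one flat pass that maintains a stack of (unit,count) groups - each element either pushes a new group or bumps the top count on a lowercase-to-uppercase step - followed by a separate formatting comprehension.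
import Mathlib
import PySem

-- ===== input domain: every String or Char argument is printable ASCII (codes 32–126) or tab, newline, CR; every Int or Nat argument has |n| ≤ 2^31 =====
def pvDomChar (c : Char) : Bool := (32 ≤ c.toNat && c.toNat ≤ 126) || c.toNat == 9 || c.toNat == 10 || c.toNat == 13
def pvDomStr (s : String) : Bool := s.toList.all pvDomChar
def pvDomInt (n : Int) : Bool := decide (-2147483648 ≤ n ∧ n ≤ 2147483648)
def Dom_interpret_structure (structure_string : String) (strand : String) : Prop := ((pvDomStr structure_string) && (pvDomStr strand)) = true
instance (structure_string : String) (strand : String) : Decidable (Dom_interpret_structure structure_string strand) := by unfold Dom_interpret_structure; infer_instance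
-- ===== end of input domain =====

-- B replaces A's nested dual-pointer run scanning by one flat pass over the elements
-- maintaining a stack of (unit, count) groups, plus a separate formatting pass (simpler).

-- Python str.islower()/str.isupper() are not PySem primitives; ported by hand, exact on the
-- ASCII domain: at least one cased (letter) character and no cased character of the other case.
def pyStrIslower (s : String) : Bool :=
  s.toList.any PySem.Chars.islower && !s.toList.any PySem.Chars.isupper

def pyStrIsupper (s : String) : Bool :=
  s.toList.any PySem.Chars.isupper && !s.toList.any PySem.Chars.islower

-- ===== PORT A =====
-- inner while loop of A: scans the run of elements whose upper() equals u, threading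
-- (prev_was_lower, tandem_count); returns the final count and the remaining elements.
def aCountRun (u : String) : List String → Bool → Int → Int × List String
  | [], _, cnt => (cnt, [])
  | x :: xs, prev, cnt =>
    if PySem.Str.upper x == u then
      aCountRun u xs (pyStrIslower x) (cnt + if pyStrIsupper x && prev then 1 else 0)
    else (cnt, x :: xs)

-- needed by aLoop's termination proof (cited in its decreasing_by)
theorem aCountRun_snd_length_le (u : String) (l : List String) (prev : Bool) (cnt : Int) :
    (aCountRun u l prev cnt).2.length ≤ l.length := by
  induction l generalizing prev cnt with
  | nil => simp [aCountRun]
  | cons x xs ih =>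
    simp only [aCountRun]
    split
    · exact le_trans (ih _ _) (Nat.le_succ _)
    · exact le_refl _

-- outer while loop of A over the element list
def aLoop : List String → List String
  | [] => []
  | x :: xs =>
    let u := PySem.Str.upper x
    if u == "U" then
      "U" :: aLoop (List.dropWhile (fun e => PySem.Str.upper e == "U") xs)
    else
      let r := aCountRun u (x :: xs) false 1
      (if r.1 > 1 then u ++ "×" ++ PySem.Int.toStr r.1 else u) :: aLoop r.2
termination_by l => l.length
decreasing_by
  · exact Nat.lt_succ_of_le (List.length_dropWhile_le _ _)
  · have hx : (PySem.Str.upper x == u) = true := beq_self_eq_true _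
    show (aCountRun u (x :: xs) false 1).2.length < (x :: xs).length
    rw [aCountRun, if_pos hx]
    exact Nat.lt_succ_of_le (aCountRun_snd_length_le u xs _ _)

def interpret_structure (structure_string : String) (strand : String) : String :=
  let structure_string :=
    if strand == "-" then
      PySem.Str.join "-" ((PySem.Str.split? structure_string "-").getD []).reverse
    else structure_string
  let elements := (PySem.Str.split? structure_string "-").getD []
  PySem.Str.join "-" (aLoop elements)

-- ===== PORT B =====
-- one step of B's flat for loop; the Python list 'groups' is kept head-first
-- (head = groups[-1], the standard transcription of append/last-mutation), reversed at the end.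
def bStep : List (String × Int) × Option String → String → List (String × Int) × Option String
  | (groups, prev), el =>
    let u := PySem.Str.upper el
    let groups' :=
      match groups with
      | [] => [(u, 1)]
      | (gu, c) :: rest =>
        if gu != u then (u, 1) :: (gu, c) :: rest
        else if pyStrIsupper el && (match prev with
                                    | some p => pyStrIslower p
                                    | none => false) then
          (gu, c + 1) :: rest
        else (gu, c) :: rest
    (groups', some el)

-- B's final formatting of one (unit, count) group
def bFmt (p : String × Int) : String :=
  if p.1 == "U" || p.2 == 1 then p.1 else p.1 ++ "×" ++ PySem.Int.toStr p.2

def interpret_structure_alt (structure_string : String) (strand : String) : String :=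
  let structure_string :=
    if strand == "-" then
      PySem.Str.join "-" ((PySem.Str.split? structure_string "-").getD []).reverse
    else structure_string
  let elements := (PySem.Str.split? structure_string "-").getD []
  let groups := (elements.foldl bStep ([], none)).1.reverse
  PySem.Str.join "-" (groups.map bFmt)

-- ===== PRECONDITION & SPEC =====
def Spec_interpret_structure (structure_string : String) (strand : String) (out : String) : Prop := out = interpret_structure_alt structure_string strand
instance (structure_string : String) (strand : String) (out : String) : Decidable (Spec_interpret_structure structure_string strand out) := by unfold Spec_interpret_structure; infer_instance

-- ===== CLAIM (what is proved, stated in full; the proofs are below) =====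
def Claim_equal_interpret_structure : Prop := ∀ (structure_string : String) (strand : String), Dom_interpret_structure structure_string strand → Spec_interpret_structure structure_string strand (interpret_structure structure_string strand)

-- ===== LEMMAS AND PROOFS =====

-- maximal runs of equal uppercased elements (proof-side canonical decomposition)
def runs : List String → List (List String)
  | [] => []
  | x :: xs =>
    (x :: List.takeWhile (fun y => PySem.Str.upper y == PySem.Str.upper x) xs)
      :: runs (List.dropWhile (fun y => PySem.Str.upper y == PySem.Str.upper x) xs)
termination_by l => l.length
decreasing_by exact Nat.lt_succ_of_le (List.length_dropWhile_le _ _)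

-- transition count threaded through a run, as a function of the incoming flag
def transCnt : Bool → List String → Int
  | _, [] => 0
  | prev, y :: ys => (if pyStrIsupper y && prev then 1 else 0) + transCnt (pyStrIslower y) ys

def pairOf (g : List String) : String × Int :=
  (PySem.Str.upper (g.headD ""), 1 + transCnt false g)

theorem transCnt_nonneg (prev : Bool) (l : List String) : 0 ≤ transCnt prev l := by
  induction l generalizing prev with
  | nil => simp [transCnt]
  | cons y ys ih => simp only [transCnt]; have := ih (pyStrIslower y); split <;> omega

theorem aCountRun_eq (u : String) (l : List String) (prev : Bool) (cnt : Int) :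
    aCountRun u l prev cnt =
      (cnt + transCnt prev (List.takeWhile (fun y => PySem.Str.upper y == u) l),
       List.dropWhile (fun y => PySem.Str.upper y == u) l) := by
  induction l generalizing prev cnt with
  | nil => simp [aCountRun, transCnt]
  | cons x xs ih =>
    simp only [aCountRun, List.takeWhile_cons, List.dropWhile_cons]
    by_cases h : (PySem.Str.upper x == u) = true
    · simp [h, ih, transCnt, add_assoc]
    · simp [h, transCnt]

theorem aLoop_eq_runs_bounded (n : Nat) :
    ∀ l : List String, l.length ≤ n → aLoop l = (runs l).map (fun g => bFmt (pairOf g)) := by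
  induction n with
  | zero =>
    intro l h
    have : l = [] := List.eq_nil_of_length_eq_zero (Nat.le_zero.mp h)
    subst this; simp [aLoop, runs]
  | succ n ih =>
    intro l h
    match l with
    | [] => simp [aLoop, runs]
    | x :: xs =>
      rw [aLoop, runs]
      have hlen : (List.dropWhile (fun y => PySem.Str.upper y == PySem.Str.upper x) xs).length ≤ n :=
        le_trans (List.length_dropWhile_le _ _) (Nat.le_of_succ_le_succ h)
      by_cases hU : (PySem.Str.upper x == "U") = true
      · have hx : PySem.Str.upper x = "U" := eq_of_beq hU
        simp only [List.map_cons, hx]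
        rw [if_pos (show (("U" : String) == "U") = true from rfl)]
        congr 1
        · simp [bFmt, pairOf, hx]
        · rw [ih _ (by rw [hx] at hlen; exact hlen)]
      · have hrun : aCountRun (PySem.Str.upper x) (x :: xs) false 1
            = (1 + transCnt (pyStrIslower x)
                 (List.takeWhile (fun y => PySem.Str.upper y == PySem.Str.upper x) xs),
               List.dropWhile (fun y => PySem.Str.upper y == PySem.Str.upper x) xs) := by
          rw [aCountRun_eq]
          simp [transCnt]
        simp only [List.map_cons]
        rw [if_neg hU, hrun]
        congr 1
        · have hcnt : (pairOf (x :: List.takeWhile (fun y => PySem.Str.upper y == PySem.Str.upper x) xs)).2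
              = 1 + transCnt (pyStrIslower x) (List.takeWhile (fun y => PySem.Str.upper y == PySem.Str.upper x) xs) := by
            simp [pairOf, transCnt]
          have hu : (pairOf (x :: List.takeWhile (fun y => PySem.Str.upper y == PySem.Str.upper x) xs)).1
              = PySem.Str.upper x := by simp [pairOf]
          rw [bFmt, hcnt, hu]
          have hnn := transCnt_nonneg (pyStrIslower x) (List.takeWhile (fun y => PySem.Str.upper y == PySem.Str.upper x) xs)
          by_cases hgt : (1 : Int) + transCnt (pyStrIslower x) (List.takeWhile (fun y => PySem.Str.upper y == PySem.Str.upper x) xs) > 1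
          · rw [if_pos hgt, if_neg (by simp [hU]; omega)]
          · rw [if_neg hgt, if_pos (by simp; omega)]
        · exact ih _ hlen

-- the head of dropWhile fails the predicate
theorem head_dropWhile_false {α : Type} (p : α → Bool) :
    ∀ (l : List α) (d : α), (List.dropWhile p l).head? = some d → p d = false := by
  intro l
  induction l with
  | nil => intro d h; simp [List.dropWhile] at h
  | cons a t ih =>
    intro d h
    rw [List.dropWhile_cons] at h
    by_cases ha : p a = true
    · rw [if_pos ha] at h; exact ih d h
    · rw [if_neg ha] at h
      simp at h
      subst h
      exact Bool.eq_false_iff.mpr ha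

-- B's fold across one run tail: every element has upper = u, stack top already (u, c)
theorem fold_run (t : List String) : ∀ (u : String) (c : Int) (rest : List (String × Int)) (p : String),
    (∀ y ∈ t, PySem.Str.upper y = u) →
    t.foldl bStep ((u, c) :: rest, some p)
      = ((u, c + transCnt (pyStrIslower p) t) :: rest, some (t.getLastD p)) := by
  induction t with
  | nil => intro u c rest p _; simp [transCnt]
  | cons y ys ih =>
    intro u c rest p hall
    have hy : PySem.Str.upper y = u := hall y (by simp)
    simp only [List.foldl_cons]
    have hstep : bStep ((u, c) :: rest, some p) y
        = ((u, c + if pyStrIsupper y && pyStrIslower p then 1 else 0) :: rest, some y) := by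
      simp only [bStep, hy, bne_self_eq_false]
      split_ifs <;> simp_all
    rw [hstep, ih u _ rest y (fun z hz => hall z (by simp [hz]))]
    simp only [transCnt, List.getLastD_cons]
    rw [add_assoc]

theorem foldB_eq_runs_bounded (n : Nat) :
    ∀ l : List String, l.length ≤ n →
    ∀ (groups : List (String × Int)) (prev : Option String),
    (∀ t ∈ groups.head?, ∀ x ∈ l.head?, t.1 ≠ PySem.Str.upper x) →
    (l.foldl bStep (groups, prev)).1 = ((runs l).map pairOf).reverse ++ groups := by
  induction n with
  | zero =>
    intro l h
    have : l = [] := List.eq_nil_of_length_eq_zero (Nat.le_zero.mp h)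
    subst this; intro groups prev _; simp [runs]
  | succ n ih =>
    intro l h groups prev hcompat
    match l with
    | [] => simp [runs]
    | x :: xs =>
      have hpush : bStep (groups, prev) x = ((PySem.Str.upper x, 1) :: groups, some x) := by
        match groups with
        | [] => simp [bStep]
        | (gu, c) :: gs =>
          have hne : gu ≠ PySem.Str.upper x := hcompat (gu, c) (by simp) x (by simp)
          simp [bStep, hne]
      simp only [List.foldl_cons, hpush]
      have hsplit : xs = List.takeWhile (fun y => PySem.Str.upper y == PySem.Str.upper x) xs
          ++ List.dropWhile (fun y => PySem.Str.upper y == PySem.Str.upper x) xs :=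
        (List.takeWhile_append_dropWhile).symm
      conv_lhs => rw [hsplit]
      rw [List.foldl_append]
      have htake : ∀ y ∈ List.takeWhile (fun y => PySem.Str.upper y == PySem.Str.upper x) xs,
          PySem.Str.upper y = PySem.Str.upper x := by
        intro y hy
        exact eq_of_beq (List.mem_takeWhile_imp
          (p := fun y => PySem.Str.upper y == PySem.Str.upper x) hy)
      rw [fold_run _ _ _ _ _ htake]
      have hlen : (List.dropWhile (fun y => PySem.Str.upper y == PySem.Str.upper x) xs).length ≤ n :=
        le_trans (List.length_dropWhile_le _ _) (Nat.le_of_succ_le_succ h)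
      have hcompat' : ∀ t ∈ ((PySem.Str.upper x, 1 + transCnt (pyStrIslower x)
            (List.takeWhile (fun y => PySem.Str.upper y == PySem.Str.upper x) xs)) :: groups).head?,
          ∀ z ∈ (List.dropWhile (fun y => PySem.Str.upper y == PySem.Str.upper x) xs).head?,
          t.1 ≠ PySem.Str.upper z := by
        intro t ht z hz
        simp at ht
        subst ht
        have hzf := head_dropWhile_false _ _ _ hz
        simp at hzf
        intro hcontra
        exact hzf hcontra.symm
      rw [ih _ hlen _ _ hcompat']
      rw [runs]
      simp only [List.map_cons, List.reverse_cons, List.append_assoc]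
      congr 2
      simp [pairOf, transCnt]

theorem loops_agree (l : List String) :
    aLoop l = ((l.foldl bStep ([], none)).1.reverse).map bFmt := by
  rw [foldB_eq_runs_bounded l.length l (le_refl _) [] none (by simp)]
  rw [aLoop_eq_runs_bounded l.length l (le_refl _)]
  simp

-- ===== VERDICT (by name: the statement is the Claim_ definition above) =====
theorem interpret_structure_spec : Claim_equal_interpret_structure := by
  intro s strand _
  unfold Spec_interpret_structure interpret_structure interpret_structure_alt
  simp only [loops_agree]
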